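-- pv_equiv track=rewrite | github.com/omitsuhashi/dotfiles | .agents/skills/gh-work-item-implementer/scripts/fetch_context.py | _is_not_found
-- ===== SOURCE A (Python) =====
-- def _is_not_found(stderr: str) -> bool:
--     normalized = stderr.lower()
--     tokens = [
--         "http 404",
--         "http 410",
--         "not found",
--         "gone",
--         "resource not accessible",
--     ]
--     return any(token in normalized for token in tokens)
-- ===== SOURCE B (Python) =====
-- def _is_not_found(stderr: str) -> bool:
--     s = stderr.lower()
--     tokens = (
--         "http 404",
--         "http 410",
--         "not found",
--         "gone",
--         "resource not accessible",
--     )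
--     for i in range(len(s)):
--         if any(s.startswith(token, i) for token in tokens):
--             return True
--     return False
-- ===== Notes on version B (the rewrite author's own statement) =====
-- stated objective: alternative
-- what changed: B does a single left-to-right scan over the lowered string, testing at each position whether any token starts there, instead of A's per-token independent substring searches over the whole string.
import Mathlib
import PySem

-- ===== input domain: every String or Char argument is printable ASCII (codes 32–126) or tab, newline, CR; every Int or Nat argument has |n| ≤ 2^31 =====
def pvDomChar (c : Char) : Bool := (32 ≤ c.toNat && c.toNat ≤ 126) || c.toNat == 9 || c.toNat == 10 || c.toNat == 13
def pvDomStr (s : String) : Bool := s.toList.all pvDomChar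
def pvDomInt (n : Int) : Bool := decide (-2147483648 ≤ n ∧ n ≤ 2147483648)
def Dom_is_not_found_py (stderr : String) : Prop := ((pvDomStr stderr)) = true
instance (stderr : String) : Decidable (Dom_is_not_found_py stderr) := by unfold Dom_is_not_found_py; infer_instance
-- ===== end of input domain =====

-- B replaces A's per-token whole-string substring searches by a single left-to-right
-- scan testing at each position whether any token starts there (objective: alternative).

-- ===== PORT A =====
def pvTokens : List String :=
  ["http 404", "http 410", "not found", "gone", "resource not accessible"]

def is_not_found_py (stderr : String) : Bool :=
  let normalized := PySem.Str.lower stderr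
  pvTokens.any (fun token => PySem.Str.isIn token normalized)

-- ===== PORT B =====
-- Source B's loop 'for i in range(len(s)): if any(s.startswith(token, i) …)' as structural
-- recursion over the suffixes of s (s.startswith(t, i) = startswith of the i-th suffix).
def pvScan (s : List Char) : Bool :=
  match s with
  | [] => false
  | _ :: rest =>
    if pvTokens.any (fun token => PySem.Chars.startswith s token.toList) then true
    else pvScan rest

def is_not_found_py_alt (stderr : String) : Bool :=
  pvScan (PySem.Str.lower stderr).toList

-- ===== PRECONDITION & SPEC =====
def Spec_is_not_found_py (stderr : String) (out : Bool) : Prop := out = is_not_found_py_alt stderr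
instance (stderr : String) (out : Bool) : Decidable (Spec_is_not_found_py stderr out) := by unfold Spec_is_not_found_py; infer_instance

-- ===== CLAIM (what is proved, stated in full; the proofs are below) =====
def Claim_equal_is_not_found_py : Prop := ∀ (stderr : String), Dom_is_not_found_py stderr → Spec_is_not_found_py stderr (is_not_found_py stderr)

-- ===== LEMMAS AND PROOFS =====

-- every token is nonempty, so no token is an infix of []
theorem pvTokens_ne_nil : ∀ t ∈ pvTokens, t.toList ≠ [] := by decide

theorem pvScan_eq_any_infix (s : List Char) :
    pvScan s = pvTokens.any (fun token => decide (token.toList <:+: s)) := by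
  induction s with
  | nil =>
    simp only [pvScan]
    symm
    rw [List.any_eq_false]
    intro t ht
    simpa [List.infix_nil] using pvTokens_ne_nil t ht
  | cons c rest ih =>
    simp only [pvScan]
    by_cases h : pvTokens.any (fun token => PySem.Chars.startswith (c :: rest) token.toList) = true
    · simp only [h, if_true]
      obtain ⟨t, ht, hpre⟩ := List.any_eq_true.mp h
      symm
      refine List.any_eq_true.mpr ⟨t, ht, ?_⟩
      exact decide_eq_true ((PySem.Chars.startswith_iff _ _).mp hpre).isInfix
    · rw [if_neg h, ih]
      rw [Bool.eq_iff_iff, List.any_eq_true, List.any_eq_true]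
      refine exists_congr fun t => and_congr_right fun ht => ?_
      simp only [decide_eq_true_iff]
      have hns : PySem.Chars.startswith (c :: rest) t.toList = false := by
        rcases Bool.eq_false_or_eq_true (PySem.Chars.startswith (c :: rest) t.toList) with h' | h'
        · exact absurd (List.any_eq_true.mpr ⟨t, ht, h'⟩) h
        · exact h'
      have hnp : ¬ t.toList <+: c :: rest := fun hp =>
        by simp [(PySem.Chars.startswith_iff _ _).mpr hp] at hns
      constructor
      · exact fun hi => List.infix_cons_iff.mpr (Or.inr hi)
      · exact fun hic => (List.infix_cons_iff.mp hic).elim (fun hp => absurd hp hnp) id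

-- ===== VERDICT (by name: the statement is the Claim_ definition above) =====
theorem is_not_found_py_spec : Claim_equal_is_not_found_py := by
  intro stderr _
  unfold Spec_is_not_found_py is_not_found_py is_not_found_py_alt
  rw [pvScan_eq_any_infix]
  rw [Bool.eq_iff_iff, List.any_eq_true, List.any_eq_true]
  refine exists_congr fun t => and_congr_right fun _ => ?_
  simp [PySem.Str.isIn, PySem.Chars.isIn_iff_infix]
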